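-- pv_equiv track=rewrite | github.com/sigridjineth/algorithm_log | daily_problem/bracket_converter.py | solution
-- ===== SOURCE A (Python) =====
-- def balanced_index(p):
--     # 왼쪽 괄호의 개수
--     count = 0
--     for i in range(len(p)):
--         if p[i] == '(':
--             count += 1
--         if p[i] == ')':
--             count -= 1
--         if count == 0:
--             return i
--
-- def check_proper(p):
--     # 왼쪽 괄호의 개수
--     count = 0
--     for i in p:
--         if i == '(':
--             count += 1
--         else:
--             if (count == 0):
--                 return False
--             count -= 1
--     return True
--
-- def solution(char):
--     answer = ""
--     # 빈 문자열이 들어왔으면 빈 문자열 리턴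
--     if (char == ""):
--         return answer
--     # 문자열 w를 두 "균형 잡힌 괄호 문자열" u와 v로 분리한다
--     index = balanced_index(char)
--     u = char[0:index+1]
--     v = char[index+1:]
--     # u가 "올바른 괄호 문자열"이면, v에 대해 함수를 수행한 결과를 붙여 반환
--     if (check_proper(u)):
--         answer = u + solution(v)
--     # u가 "올바른 괄호 문자열"이 아니라면, 다음의 단계를 수행
--     else:
--         # 4-1
--         answer = "("
--         # 4-2
--         answer += solution(v)
--         # 4-3
--         answer += ")"
--         # 4-4
--         u = list(u[1:-1])
--         for i in range(len(u)):
--             if (u[i] == "("):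
--                 u[i] = ")"
--             else:
--                 u[i] = "("
--         answer += "".join(u)
--
--     return answer
-- ===== SOURCE B (Python) =====
-- def solution(char):
--     # One-pass iterative version: split into top-level balanced segments with a
--     # running counter; proper segments go to the front part, improper ones add
--     # "(" in front and push ")" + flipped-inner onto a suffix stack.
--     pre = []
--     sufs = []
--     count = 0
--     seg = []
--     for c in char:
--         seg.append(c)
--         if c == '(':
--             count += 1
--         elif c == ')':
--             count -= 1
--         if count == 0:
--             if is_proper(seg):
--                 pre.extend(seg)
--             else:
--                 pre.append('(')
--                 sufs.append(')' + ''.join('(' if x != '(' else ')' for x in seg[1:-1]))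
--             seg = []
--     return ''.join(pre) + ''.join(reversed(sufs))
--
-- def is_proper(seg):
--     depth = 0
--     for c in seg:
--         depth += 1 if c == '(' else -1
--         if depth < 0:
--             return False
--     return True
-- ===== Notes on version B (the rewrite author's own statement) =====
-- stated objective: faster
-- what changed: Replaces A's recursion that re-slices the remaining string at every level (repeated balanced_index scans and string concatenations) with a single left-to-right pass that splits the string into top-level balanced segments with one running counter, appending proper segments to a prefix and pushing the transformed tails of improper segments onto a suffix stack joined once at the end.
import Mathlib
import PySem

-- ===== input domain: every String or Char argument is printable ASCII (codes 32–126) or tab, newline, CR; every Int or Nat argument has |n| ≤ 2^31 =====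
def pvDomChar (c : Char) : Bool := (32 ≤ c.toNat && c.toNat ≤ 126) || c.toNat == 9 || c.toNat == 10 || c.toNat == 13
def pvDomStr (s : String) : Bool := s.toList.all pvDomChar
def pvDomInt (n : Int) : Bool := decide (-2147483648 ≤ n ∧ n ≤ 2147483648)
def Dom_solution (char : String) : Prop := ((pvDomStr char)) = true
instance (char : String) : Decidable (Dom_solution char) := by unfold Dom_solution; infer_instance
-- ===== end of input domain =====

-- B replaces A's recursive re-slicing (quadratic) by one linear pass over top-level
-- balanced segments with a suffix stack; equivalence proved on all inputs where A returns.


-- ===== PORT A =====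
-- balanced_index: loop over indices keeping the running count; returns the first index
-- where the count is 0 (relative index built by `.map (·+1)`), None if never.
def pvBalGo : List Char → Int → Option Nat
  | [], _ => none
  | c :: rest, count =>
    let count1 := if c = '(' then count + 1 else count
    let count2 := if c = ')' then count1 - 1 else count1
    if count2 = 0 then some 0 else (pvBalGo rest count2).map (· + 1)

def pvBalancedIndex (p : List Char) : Option Nat := pvBalGo p 0

-- check_proper, with the running `count` as the loop state
def pvCheckProper : List Char → Int → Bool
  | [], _ => true
  | c :: rest, count =>
    if c = '(' then pvCheckProper rest (count + 1)
    else if count = 0 then false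
    else pvCheckProper rest (count - 1)

-- the in-place flipping loop of step 4-4: u[i] = ")" if u[i] == "(" else "("
def pvFlipA (c : Char) : Char := if c = '(' then ')' else '('

-- length fact needed by pvSolA's termination proof (cited in decreasing_by)
theorem pv_len_slice_from (p : List Char) (i : Nat) :
    (PySem.List.slice p (some ((i : Int) + 1)) none).length = p.length - (i + 1) := by
  rw [show ((i : Int) + 1) = ((i + 1 : Nat) : Int) by push_cast; ring,
      PySem.List.slice_from_natCast]
  simp

def pvSolA (p : List Char) : List Char :=
  if p = [] then []
  else
    match pvBalancedIndex p with
    | none => []   -- here Python's A raises TypeError (balanced_index returned None); excluded by Pre_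
    | some i =>
      let u := PySem.List.slice p (some 0) (some ((i : Int) + 1))
      let v := PySem.List.slice p (some ((i : Int) + 1)) none
      if pvCheckProper u 0 then u ++ pvSolA v
      else '(' :: (pvSolA v ++ ')' :: (PySem.List.slice u (some 1) (some (-1))).map pvFlipA)
termination_by p.length
decreasing_by
  all_goals
    rw [pv_len_slice_from]
    have : p.length ≠ 0 := by simpa [List.length_eq_zero_iff] using ‹¬ p = []›
    omega

def solution (char : String) : String := String.ofList (pvSolA char.toList)

-- ===== PORT B =====
def pvFlipB (x : Char) : Char := if x ≠ '(' then '(' else ')'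

-- is_proper: depth += 1 if '(' else -1; False as soon as depth < 0
def pvIsProper : List Char → Int → Bool
  | [], _ => true
  | c :: rest, depth =>
    let depth' := depth + (if c = '(' then 1 else -1)
    if depth' < 0 then false else pvIsProper rest depth'

-- the single for-loop of Source B: state = (count, seg, pre, sufs); sufs is consed
-- (Python appends and reverses at the end), both joined after the loop
def pvLoopB : List Char → Int → List Char → List Char → List (List Char) → List Char
  | [], _, _, pre, sufs => pre ++ sufs.flatten
  | c :: rest, count, seg, pre, sufs =>
    let seg' := seg ++ [c]
    let count' := if c = '(' then count + 1 else if c = ')' then count - 1 else count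
    if count' = 0 then
      if pvIsProper seg' 0 then pvLoopB rest 0 [] (pre ++ seg') sufs
      else pvLoopB rest 0 [] (pre ++ ['('])
        ((')' :: (PySem.List.slice seg' (some 1) (some (-1))).map pvFlipB) :: sufs)
    else pvLoopB rest count' seg' pre sufs

def solution_alt (char : String) : String := String.ofList (pvLoopB char.toList 0 [] [] [])

-- ===== PRECONDITION & SPEC =====
def pvBalVal (c : Char) : Int := if c = '(' then 1 else if c = ')' then -1 else 0

-- Pre_: A returns normally exactly when the total bracket balance is 0; otherwise
-- balanced_index returns None at some recursion level and A raises TypeError.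
def Pre_solution (char : String) : Prop := (char.toList.map pvBalVal).sum = 0
instance (char : String) : Decidable (Pre_solution char) := by unfold Pre_solution; infer_instance

def pvWitness_solution : String := "()))(("

def Spec_solution (char : String) (out : String) : Prop := out = solution_alt char
instance (char : String) (out : String) : Decidable (Spec_solution char out) := by unfold Spec_solution; infer_instance

-- ===== CLAIM (what is proved, stated in full; the proofs are below) =====
def Claim_equal_solution : Prop := ∀ (char : String), Dom_solution char → Pre_solution char → Spec_solution char (solution char)

-- ===== LEMMAS AND PROOFS =====

theorem pvFlip_eq : pvFlipA = pvFlipB := by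
  funext c
  by_cases h : c = '(' <;> simp [pvFlipA, pvFlipB, h]

-- A's two separate ifs and B's if/elif compute the same updated count
theorem pvCount_eq (c : Char) (count : Int) :
    (if c = ')' then (if c = '(' then count + 1 else count) - 1
     else (if c = '(' then count + 1 else count)) =
    (if c = '(' then count + 1 else if c = ')' then count - 1 else count) := by
  by_cases h1 : c = '(' <;> by_cases h2 : c = ')' <;> simp_all

theorem pvProper_eq : ∀ (u : List Char) (d : Int), 0 ≤ d →
    pvCheckProper u d = pvIsProper u d := by
  intro u
  induction u with
  | nil => intro d _; rfl
  | cons c rest ih =>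
    intro d hd
    by_cases h : c = '('
    · simp [pvCheckProper, pvIsProper, h, ih (d + 1) (by omega),
        show ¬ (d + 1 < 0) by omega]
    · by_cases h0 : d = 0
      · simp [pvCheckProper, pvIsProper, h, h0]
      · simp only [pvCheckProper, pvIsProper, h, h0, if_false]
        rw [show d + (-1 : Int) = d - 1 by ring,
          if_neg (show ¬ (d - 1 < 0) by omega), ih (d - 1) (by omega)]

-- the accumulators of pvLoopB factor out
theorem pvLoopB_acc : ∀ (p : List Char) (c : Int) (s pre : List Char) (sufs : List (List Char)),
    pvLoopB p c s pre sufs = pre ++ pvLoopB p c s [] [] ++ sufs.flatten := by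
  intro p
  induction p with
  | nil => intro c s pre sufs; simp [pvLoopB]
  | cons x rest ih =>
    intro c s pre sufs
    simp only [pvLoopB]
    by_cases hc : (if x = '(' then c + 1 else if x = ')' then c - 1 else c) = 0
    · rw [if_pos hc, if_pos hc]
      by_cases hp : pvIsProper (s ++ [x]) 0 = true
      · rw [if_pos hp, if_pos hp, ih _ _ (pre ++ (s ++ [x])) sufs, ih _ _ ([] ++ (s ++ [x])) []]
        simp
      · rw [if_neg hp, if_neg hp, ih _ _ (pre ++ ['(']) _, ih _ _ ([] ++ ['(']) _]
        simp
    · rw [if_neg hc, if_neg hc, ih _ _ pre sufs, ih _ _ [] []]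

-- one segment of pvLoopB corresponds to one level of A's recursion
theorem pvLoopB_bridge : ∀ (p : List Char) (count : Int) (seg : List Char),
    pvLoopB p count seg [] [] =
      match pvBalGo p count with
      | none => []
      | some i =>
        if pvIsProper (seg ++ p.take (i + 1)) 0 then
          (seg ++ p.take (i + 1)) ++ pvLoopB (p.drop (i + 1)) 0 [] [] []
        else
          '(' :: (pvLoopB (p.drop (i + 1)) 0 [] [] [] ++
            ')' :: (PySem.List.slice (seg ++ p.take (i + 1)) (some 1) (some (-1))).map pvFlipB) := by
  intro p
  induction p with
  | nil => intro count seg; simp [pvLoopB, pvBalGo]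
  | cons c rest ih =>
    intro count seg
    simp only [pvLoopB, pvBalGo, pvCount_eq]
    by_cases h0 : (if c = '(' then count + 1 else if c = ')' then count - 1 else count) = 0
    · rw [if_pos h0, if_pos h0]
      simp only [List.take_succ_cons, List.take_zero, List.drop_succ_cons, List.drop_zero]
      by_cases hp : pvIsProper (seg ++ [c]) 0 = true
      · rw [if_pos hp, if_pos hp, pvLoopB_acc rest 0 [] ([] ++ (seg ++ [c])) []]
        simp
      · rw [if_neg hp, if_neg hp, pvLoopB_acc rest 0 [] ([] ++ ['(']) _]
        simp
    · rw [if_neg h0, if_neg h0, ih _]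
      cases hg : pvBalGo rest (if c = '(' then count + 1 else if c = ')' then count - 1 else count) with
      | none => simp
      | some i =>
        simp only [Option.map_some]
        have harr : seg ++ [c] ++ rest.take (i + 1) = seg ++ (c :: rest).take (i + 1 + 1) := by
          simp
        rw [harr]
        simp

theorem pvMain : ∀ (p : List Char), pvSolA p = pvLoopB p 0 [] [] [] := by
  intro p
  generalize hn : p.length = n
  induction n using Nat.strong_induction_on generalizing p with
  | _ n ih =>
    subst hn
    rw [pvLoopB_bridge p 0 []]
    rw [pvSolA]
    by_cases hp : p = []
    · subst hp; simp [pvBalGo]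
    · rw [if_neg hp]
      cases hb : pvBalancedIndex p with
      | none => rw [pvBalancedIndex] at hb; rw [hb]
      | some i =>
        rw [pvBalancedIndex] at hb; rw [hb]
        have hu : PySem.List.slice p (some 0) (some ((i : Int) + 1)) = p.take (i + 1) := by
          rw [show ((i : Int) + 1) = ((i + 1 : Nat) : Int) by push_cast; ring,
            PySem.List.slice_zero_start, PySem.List.slice_to_natCast]
        have hv : PySem.List.slice p (some ((i : Int) + 1)) none = p.drop (i + 1) := by
          rw [show ((i : Int) + 1) = ((i + 1 : Nat) : Int) by push_cast; ring,
            PySem.List.slice_from_natCast]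
        have hrec : pvSolA (p.drop (i + 1)) = pvLoopB (p.drop (i + 1)) 0 [] [] [] := by
          apply ih (p.drop (i + 1)).length _ _ rfl
          have : p.length ≠ 0 := by simpa [List.length_eq_zero_iff] using hp
          simp only [List.length_drop]
          omega
        simp only [hu, hv, List.nil_append,
          pvProper_eq (p.take (i + 1)) 0 le_rfl, hrec, pvFlip_eq]

-- ===== VERDICT (by name: the statement is the Claim_ definition above) =====
theorem solution_spec : Claim_equal_solution := by
  intro char _ _
  unfold Spec_solution solution solution_alt
  rw [pvMain]
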